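-- pv_equiv track=rewrite | github.com/Jupiter-J/Python-Algorithm | 프로그래머스/기초/옹알이1.py | solution
-- ===== SOURCE A (Python) =====
-- from itertools import permutations
--
-- def solution(babbling):
--     answer = 0
--     speek = ["aya","ye","woo","ma"]
--     word = []
--
--     for i in range(1, len(speek)+1): #1,2,3,4개를 사용한 모든 경우의 수 생성
--         for j in permutations(speek, i):
--             word.append(''.join(j)) # 문자열로 합치기
--
--     for i in babbling:
--         if i in word:
--             answer += 1
--     return answer
-- ===== SOURCE B (Python) =====
-- def solution(babbling):
--     sounds = ["aya", "ye", "woo", "ma"]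
--
--     def ok(word):
--         rest = word
--         used = []
--         while rest:
--             for s in sounds:
--                 if s not in used and rest.startswith(s):
--                     used.append(s)
--                     rest = rest[len(s):]
--                     break
--             else:
--                 return False
--         return bool(used)
--
--     return sum(1 for w in babbling if ok(w))
-- ===== Notes on version B (the rewrite author's own statement) =====
-- stated objective: alternative
-- what changed: Instead of pre-generating all 64 permutation-joins of the 4 sounds and testing list membership, B parses each word greedily, consuming one not-yet-used sound at a time (the sounds' distinct first letters make this exact).
import Mathlib
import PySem

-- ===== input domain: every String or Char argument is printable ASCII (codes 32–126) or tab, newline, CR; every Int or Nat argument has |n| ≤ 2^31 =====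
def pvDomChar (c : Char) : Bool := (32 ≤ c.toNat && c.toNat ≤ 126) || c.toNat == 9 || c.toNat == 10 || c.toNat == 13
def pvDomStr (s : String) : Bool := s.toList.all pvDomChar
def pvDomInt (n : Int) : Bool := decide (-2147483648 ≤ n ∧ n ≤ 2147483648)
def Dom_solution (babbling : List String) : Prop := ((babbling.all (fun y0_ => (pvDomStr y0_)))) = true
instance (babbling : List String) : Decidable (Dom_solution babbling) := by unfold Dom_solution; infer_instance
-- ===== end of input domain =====

-- B parses each word greedily (consume one not-yet-used sound at a time) instead of
-- testing membership in the 64 precomputed permutation-joins; alternative decomposition.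

-- ===== PORT A =====
-- the four sounds speek = ["aya","ye","woo","ma"], as lists of characters
def pvSpeek : List (List Char) := [['a','y','a'], ['y','e'], ['w','o','o'], ['m','a']]

-- itertools.permutations(pool, r): pick each element (with the remaining pool), in order
def pvPickEach {α : Type} : List α → List (α × List α)
  | [] => []
  | x :: xs => (x, xs) :: (pvPickEach xs).map (fun p => (p.1, x :: p.2))

def pvPerms {α : Type} : Nat → List α → List (List α)
  | 0, _ => [[]]
  | n+1, pool => (pvPickEach pool).flatMap (fun p => (pvPerms n p.2).map (p.1 :: ·))

-- the list 'word' A builds: ''.join(j) for i in range(1,5), j in permutations(speek, i)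
def pvWordList : List (List Char) :=
  (List.range' 1 4).flatMap (fun i => (pvPerms i pvSpeek).map List.flatten)

def solution (babbling : List String) : Int :=
  babbling.foldl (fun answer i => if pvWordList.contains i.toList then answer + 1 else answer) 0

-- ===== PORT B =====
-- the while-loop of B's ok(): find the first unused sound the suffix starts with, consume it.
-- 'fuel' is only a totalization guard (one unit per loop iteration; rest shrinks each step,
-- so fuel = word length is always enough); it changes nothing about the computed value.
def pvOkAux (fuel : Nat) (rest : List Char) (used : List (List Char)) : Bool :=
  match fuel, rest with
  | _, [] => !used.isEmpty
  | 0, _ :: _ => false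
  | f+1, c :: cs =>
    match pvSpeek.find? (fun s => !used.contains s && List.isPrefixOf s (c :: cs)) with
    | none => false
    | some s => pvOkAux f ((c :: cs).drop s.length) (used ++ [s])

def pvOk (word : List Char) : Bool := pvOkAux word.length word []

def solution_alt (babbling : List String) : Int :=
  babbling.foldl (fun acc w => acc + (if pvOk w.toList then 1 else 0)) 0

-- ===== PRECONDITION & SPEC =====
def Spec_solution (babbling : List String) (out : Int) : Prop := out = solution_alt babbling
instance (babbling : List String) (out : Int) : Decidable (Spec_solution babbling out) := by unfold Spec_solution; infer_instance

-- ===== CLAIM (what is proved, stated in full; the proofs are below) =====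
def Claim_equal_solution : Prop := ∀ (babbling : List String), Dom_solution babbling → Spec_solution babbling (solution babbling)

-- ===== LEMMAS AND PROOFS =====

-- every one of the 64 generated words is accepted by the greedy parser
theorem wordList_ok : ∀ s ∈ pvWordList, pvOk s = true := by decide

-- (x, pool.erase x) is produced by pvPickEach for any member x
theorem pickEach_mem_erase {α : Type} [DecidableEq α] (pool : List α) (x : α)
    (hx : x ∈ pool) : (x, pool.erase x) ∈ pvPickEach pool := by
  induction pool with
  | nil => cases hx
  | cons y ys ih =>
    by_cases hxy : y = x
    · subst hxy; simp [pvPickEach, List.erase_cons_head]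
    · have hx' : x ∈ ys := by
        rcases List.mem_cons.mp hx with h | h
        · exact absurd h.symm hxy
        · exact h
      simp only [pvPickEach, List.mem_cons, List.mem_map]
      right
      refine ⟨(x, ys.erase x), ih hx', ?_⟩
      simp [hxy]

-- every nodup selection from a pool is enumerated by pvPerms at its own length
theorem perms_complete {α : Type} [DecidableEq α] (p : List α) :
    ∀ pool : List α, p.Nodup → (∀ x ∈ p, x ∈ pool) → p ∈ pvPerms p.length pool := by
  induction p with
  | nil => intro pool _ _; simp [pvPerms]
  | cons x xs ih =>
    intro pool hnd hsub
    have hx : x ∈ pool := hsub x (by simp)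
    have hxnot : x ∉ xs := (List.nodup_cons.mp hnd).1
    have hsub' : ∀ y ∈ xs, y ∈ pool.erase x := by
      intro y hy
      exact (List.mem_erase_of_ne (fun h => hxnot (by rwa [h] at hy))).mpr (hsub y (by simp [hy]))
    have hrec := ih (pool.erase x) (List.nodup_cons.mp hnd).2 hsub'
    simp only [List.length_cons, pvPerms, List.mem_flatMap]
    exact ⟨(x, pool.erase x), pickEach_mem_erase pool x hx, List.mem_map.mpr ⟨xs, hrec, rfl⟩⟩

-- soundness invariant of the greedy parser
theorem okAux_sound (fuel : Nat) :
    ∀ (rest : List Char) (used : List (List Char)), used.Nodup → pvOkAux fuel rest used = true →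
    ∃ p : List (List Char), rest = p.flatten ∧ (∀ x ∈ p, x ∈ pvSpeek) ∧
      (used ++ p).Nodup ∧ used ++ p ≠ [] := by
  induction fuel with
  | zero =>
    intro rest used hnd h
    cases rest with
    | nil =>
      refine ⟨[], by simp, by simp, by simpa using hnd, ?_⟩
      simp only [pvOkAux, Bool.not_eq_true'] at h
      simpa using (List.isEmpty_eq_false_iff.mp h : used ≠ [])
    | cons c cs => exact absurd h (by simp [pvOkAux])
  | succ f ih =>
    intro rest used hnd h
    cases rest with
    | nil =>
      refine ⟨[], by simp, by simp, by simpa using hnd, ?_⟩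
      simp only [pvOkAux, Bool.not_eq_true'] at h
      simpa using (List.isEmpty_eq_false_iff.mp h : used ≠ [])
    | cons c cs =>
      simp only [pvOkAux] at h
      cases hfind : pvSpeek.find? (fun s => !used.contains s && List.isPrefixOf s (c :: cs)) with
      | none => rw [hfind] at h; exact absurd h (by simp)
      | some s =>
        rw [hfind] at h
        have hmem := List.mem_of_find?_eq_some hfind
        have hpred := List.find?_some hfind
        simp only [Bool.and_eq_true, Bool.not_eq_true', List.contains_eq_mem,
          decide_eq_false_iff_not] at hpred
        have hnd' : (used ++ [s]).Nodup := by
          rw [List.nodup_append]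
          refine ⟨hnd, List.nodup_singleton s, ?_⟩
          intro a ha b hb he
          exact hpred.1 ((he.trans (List.mem_singleton.mp hb)) ▸ ha)
        obtain ⟨p', hflat, hall, hndp, _⟩ := ih ((c :: cs).drop s.length) (used ++ [s]) hnd' h
        have hpre : s <+: (c :: cs) := List.isPrefixOf_iff_prefix.mp hpred.2
        obtain ⟨t, ht⟩ := hpre
        have hdrop : (c :: cs).drop s.length = t := by
          rw [← ht]; simp
        refine ⟨s :: p', ?_, ?_, ?_, by simp⟩
        · calc c :: cs = s ++ t := ht.symm
            _ = s ++ p'.flatten := by rw [← hdrop, hflat]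
            _ = (s :: p').flatten := by simp
        · intro x hx
          rcases List.mem_cons.mp hx with hh | hh
          · exact hh ▸ hmem
          · exact hall x hh
        · simpa [List.append_assoc] using hndp

-- the greedy parser agrees with membership in A's word list
theorem ok_eq_contains (s : List Char) : pvWordList.contains s = pvOk s := by
  cases hB : pvOk s with
  | true =>
    obtain ⟨p, hflat, hall, hnd, hne⟩ := okAux_sound s.length s [] (by simp) hB
    simp only [List.nil_append] at hflat hnd hne
    have hsp : List.Subperm p pvSpeek := List.subperm_of_subset hnd hall
    have hlen4 : p.length ≤ 4 := by simpa [pvSpeek] using hsp.length_le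
    have hlen1 : 1 ≤ p.length := by
      cases p with
      | nil => exact absurd rfl hne
      | cons _ _ => simp
    have hmem : s ∈ pvWordList := by
      simp only [pvWordList, List.mem_flatMap]
      refine ⟨p.length, ?_, List.mem_map.mpr ⟨p, perms_complete p pvSpeek hnd hall, hflat.symm⟩⟩
      have h14 : p.length = 1 ∨ p.length = 2 ∨ p.length = 3 ∨ p.length = 4 := by omega
      rcases h14 with h | h | h | h <;> rw [h] <;> decide
    simpa using hmem
  | false =>
    by_contra hcon
    have hmem : s ∈ pvWordList := by
      have : pvWordList.contains s = true := by
        cases hc : pvWordList.contains s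
        · exact absurd hc hcon
        · rfl
      simpa using this
    exact absurd (wordList_ok s hmem) (by simp [hB])

-- the two loop bodies are the same function
theorem body_eq :
    (fun (answer : Int) (i : String) => if pvWordList.contains i.toList then answer + 1 else answer)
      = (fun (acc : Int) (w : String) => acc + (if pvOk w.toList then 1 else 0)) := by
  funext a w
  rw [ok_eq_contains]
  cases pvOk w.toList <;> simp

-- ===== VERDICT (by name: the statement is the Claim_ definition above) =====
theorem solution_spec : Claim_equal_solution := by
  intro babbling _
  show solution babbling = solution_alt babbling
  unfold solution solution_alt
  rw [body_eq]
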